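-- pv_equiv track=rewrite | github.com/jiahaoxiang2000/animation | cipher/des.py | get_permuted_bits
-- ===== SOURCE A (Python) =====
-- def get_permuted_bits(bits):
--     """Simulate the P permutation (simplified)"""
--     # In a real implementation, this would use the P permutation table
--     # For demonstration, we'll just shuffle the bits in a consistent way
--     if len(bits) >= 32:
--         # Simple shuffle algorithm for demonstration
--         permuted = list(bits[:32])
--         for i in range(32):
--             new_pos = (i * 7) % 32  # A simple permutation formula
--             permuted[new_pos] = bits[i]
--
--         return "".join(permuted)
--
--     return bits  # Default fallback
-- ===== SOURCE B (Python) =====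
-- def get_permuted_bits(bits):
--     """Simulate the P permutation (simplified)"""
--     if len(bits) >= 32:
--         # Build the result recursively over destination positions: slot j receives
--         # bits[(j*23)%32], since 23 is the inverse of 7 modulo 32 (7*23 = 161 = 5*32+1),
--         # so no intermediate mutable list is needed.
--         def gather(j):
--             if j < 32:
--                 return bits[(j * 23) % 32] + gather(j + 1)
--             return ""
--         return gather(0)
--     return bits
-- ===== Notes on version B (the rewrite author's own statement) =====
-- stated objective: alternative
-- what changed: Replaces A's imperative scatter (allocate a mutable 32-slot list, write bits[i] into slot (i*7)%32 in a loop, then join) by a recursive gather over destination positions that concatenates bits[(j*23)%32] directly, using that 23 is the modular inverse of 7 mod 32, so no mutable buffer or index assignment exists in B.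
import Mathlib
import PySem

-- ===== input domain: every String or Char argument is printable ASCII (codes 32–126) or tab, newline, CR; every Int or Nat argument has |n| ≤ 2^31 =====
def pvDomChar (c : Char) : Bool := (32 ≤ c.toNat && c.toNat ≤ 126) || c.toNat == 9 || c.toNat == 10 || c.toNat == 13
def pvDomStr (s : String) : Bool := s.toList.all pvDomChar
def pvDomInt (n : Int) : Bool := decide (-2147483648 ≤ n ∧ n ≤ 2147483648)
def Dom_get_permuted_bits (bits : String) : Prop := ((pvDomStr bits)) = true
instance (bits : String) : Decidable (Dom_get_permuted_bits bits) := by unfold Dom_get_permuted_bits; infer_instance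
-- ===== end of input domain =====

-- B replaces A's imperative scatter into a mutable 32-slot list by a recursive gather over
-- destination positions via the modular inverse 23 of 7 mod 32 (alternative; same cost).

-- ===== PORT A =====
-- scatter: permuted = list(bits[:32]); for i in range(32): permuted[(i*7)%32] = bits[i]; "".join(permuted)
def get_permuted_bits (bits : String) : String :=
  let cs := bits.toList
  if 32 ≤ cs.length then
    let permuted := PySem.List.slice cs none (some 32)
    let permuted := (PySem.List.pyRange 0 32 1).foldl
      (fun p i => PySem.List.pySetD p (PySem.Int.mod (i * 7) 32) (PySem.List.pyGetD cs i ' ')) permuted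
    String.ofList permuted
  else bits

-- ===== PORT B =====
-- recursive gather helper: gather(j) = "" if j >= 32 else bits[(j*23)%32] + gather(j+1)
-- (Source B tests 'j < 32' the same way; recursion measured by the distance 32 - j)
def pvGather (cs : List Char) (j : Nat) : List Char :=
  if _h : j < 32 then
    PySem.List.pyGetD cs (PySem.Int.mod ((j : Int) * 23) 32) ' ' :: pvGather cs (j + 1)
  else []
termination_by 32 - j

def get_permuted_bits_alt (bits : String) : String :=
  let cs := bits.toList
  if 32 ≤ cs.length then String.ofList (pvGather cs 0)
  else bits

-- ===== PRECONDITION & SPEC =====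
def Spec_get_permuted_bits (bits : String) (out : String) : Prop := out = get_permuted_bits_alt bits
instance (bits : String) (out : String) : Decidable (Spec_get_permuted_bits bits out) := by unfold Spec_get_permuted_bits; infer_instance

-- ===== CLAIM (what is proved, stated in full; the proofs are below) =====
def Claim_equal_get_permuted_bits : Prop := ∀ (bits : String), Dom_get_permuted_bits bits → Spec_get_permuted_bits bits (get_permuted_bits bits)

-- ===== LEMMAS AND PROOFS =====

-- 23 is the inverse of 7 modulo 32: for p, n < 32, position p is written at step n iff n = (p*23)%32
theorem pv_inv : ∀ n, n < 32 → ∀ p, p < 32 → ((p = n * 7 % 32) ↔ (p * 23 % 32 = n)) := by decide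

-- the scatter loop never changes the length of the accumulator
theorem pv_len (cs init : List Char) (is : List Int) :
    (is.foldl (fun p i => PySem.List.pySetD p (PySem.Int.mod (i * 7) 32) (PySem.List.pyGetD cs i ' ')) init).length
    = init.length := by
  induction is generalizing init with
  | nil => rfl
  | cons i is ih => rw [List.foldl_cons, ih, PySem.List.length_pySetD]

-- a numeral-cast helper: PySem.Int.mod (↑n * c) 32 = ↑(n*c % 32)
theorem pv_mod_cast (n c : Nat) : PySem.Int.mod ((n : Int) * (c : Nat)) 32 = ((n * c % 32 : Nat) : Int) := by
  rw [show ((n : Int) * (c : Nat)) = ((n * c : Nat) : Int) by push_cast; ring,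
      show (32 : Int) = ((32 : Nat) : Int) by norm_num, PySem.Int.mod_natCast]

-- characterization of the scatter loop after the first n steps: slot p holds bits[(p*23)%32]
-- once step (p*23)%32 has run, and its initial value bits[:32][p] before that
theorem pv_get (cs : List Char) (h : 32 ≤ cs.length) (n : Nat) (hn : n ≤ 32) (p : Nat) (hp : p < 32) :
    PySem.List.pyGetD (((List.range n).map (fun k : Nat => (k : Int))).foldl
      (fun q i => PySem.List.pySetD q (PySem.Int.mod (i * 7) 32) (PySem.List.pyGetD cs i ' '))
      (cs.take 32)) (p : Int) ' '
    = if p * 23 % 32 < n then PySem.List.pyGetD cs ((p * 23 % 32 : Nat) : Int) ' '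
      else PySem.List.pyGetD (cs.take 32) (p : Int) ' ' := by
  induction n with
  | zero => simp
  | succ n ih =>
    rw [List.range_succ, List.map_append, List.foldl_append]
    simp only [List.map_cons, List.map_nil, List.foldl_cons, List.foldl_nil]
    have hl : (((List.range n).map (fun k : Nat => (k : Int))).foldl
        (fun q i => PySem.List.pySetD q (PySem.Int.mod (i * 7) 32) (PySem.List.pyGetD cs i ' '))
        (cs.take 32)).length = 32 := by
      rw [pv_len, List.length_take]; omega
    rw [show PySem.Int.mod ((n : Int) * 7) 32 = ((n * 7 % 32 : Nat) : Int) from pv_mod_cast n 7,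
        PySem.List.pyGetD_pySetD_natCast _ _ _ _ _ (by rw [hl]; exact Nat.mod_lt _ (by norm_num))]
    by_cases hpe : p = n * 7 % 32
    · have hinv : p * 23 % 32 = n := (pv_inv n (by omega) p hp).mp hpe
      rw [if_pos hpe, if_pos (by omega), hinv]
    · have hne : p * 23 % 32 ≠ n := fun hc => hpe ((pv_inv n (by omega) p hp).mpr hc)
      rw [if_neg hpe, ih (by omega)]
      by_cases hlt : p * 23 % 32 < n
      · rw [if_pos hlt, if_pos (by omega)]
      · rw [if_neg hlt, if_neg (by omega)]

-- unrolling the recursive gather from position n: it is the comprehension over range(n, 32)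
theorem pv_gather_eq_map (cs : List Char) : ∀ k n, n + k = 32 →
    pvGather cs n = (PySem.List.pyRange (n : Int) 32 1).map
      (fun j => PySem.List.pyGetD cs (PySem.Int.mod (j * 23) 32) ' ') := by
  intro k
  induction k with
  | zero =>
    intro n hn
    have : n = 32 := by omega
    subst this
    rw [pvGather, PySem.List.pyRange_one_eq_nil (by norm_num)]
    simp
  | succ k ih =>
    intro n hn
    rw [pvGather, PySem.List.pyRange_one_cons (by exact_mod_cast (by omega : n < 32))]
    simp only [List.map_cons]
    rw [dif_pos (by omega : n < 32),
        show ((n : Int) + 1) = ((n + 1 : Nat) : Int) by push_cast; ring, ih (n + 1) (by omega)]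

-- the scatter loop and the recursive gather build the same 32-character list
theorem pv_scatter_eq_gather (cs : List Char) (h : 32 ≤ cs.length) :
    (PySem.List.pyRange 0 32 1).foldl
      (fun p i => PySem.List.pySetD p (PySem.Int.mod (i * 7) 32) (PySem.List.pyGetD cs i ' '))
      (PySem.List.slice cs none (some 32))
    = pvGather cs 0 := by
  have hs : PySem.List.slice cs none (some 32) = cs.take 32 := by
    rw [PySem.List.slice_to cs (by norm_num : (0:Int) ≤ 32)]; rfl
  have hr : PySem.List.pyRange 0 32 1 = (List.range 32).map (fun k : Nat => (k : Int)) := by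
    rw [show (32 : Int) = ((32 : Nat) : Int) by norm_num, PySem.List.pyRange_zero_natCast]
  rw [pv_gather_eq_map cs 32 0 rfl, hs]
  simp only [Nat.cast_zero]
  rw [hr]
  have hl : (((List.range 32).map (fun k : Nat => (k : Int))).foldl
      (fun q i => PySem.List.pySetD q (PySem.Int.mod (i * 7) 32) (PySem.List.pyGetD cs i ' '))
      (cs.take 32)).length = 32 := by
    rw [pv_len, List.length_take]; omega
  apply List.ext_getElem?
  intro p
  by_cases hp : p < 32
  · rw [show ((List.range 32).map (fun k : Nat => (k : Int))) = PySem.List.pyRange 0 ((32 : Nat) : Int) from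
        (PySem.List.pyRange_zero_natCast 32).symm,
      PySem.List.getElem?_map_pyRange_zero _ 32 p hp,
      PySem.List.pyRange_zero_natCast,
      List.getElem?_eq_getElem (by omega)]
    have h2 := pv_get cs h 32 le_rfl p hp
    rw [if_pos (by omega)] at h2
    rw [PySem.List.pyGetD_eq_getElem _ ' ' (by omega) (by rw [hl]; omega)] at h2
    simp only [Int.toNat_natCast] at h2
    rw [h2, show PySem.Int.mod ((p : Int) * 23) 32 = ((p * 23 % 32 : Nat) : Int) from pv_mod_cast p 23]
  · rw [List.getElem?_eq_none (by rw [hl]; omega),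
        List.getElem?_eq_none (by rw [List.length_map, List.length_map, List.length_range]; omega)]

-- ===== VERDICT (by name: the statement is the Claim_ definition above) =====
theorem get_permuted_bits_spec : Claim_equal_get_permuted_bits := by
  intro bits _
  unfold Spec_get_permuted_bits get_permuted_bits get_permuted_bits_alt
  by_cases h : 32 ≤ bits.toList.length
  · simp only [if_pos h]
    exact congrArg String.ofList (pv_scatter_eq_gather bits.toList h)
  · simp only [if_neg h]
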